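-- pv_equiv track=rewrite | github.com/chanbbee0420/21-71308090 | programmers/level3/num_game.py | solution
-- ===== SOURCE A (Python) =====
-- def solution(A, B):
--     A.sort(reverse=True)
--     B.sort(reverse=True)
--     res = 0
--
--     for i in A:
--         if i < B[0]:
--             res += 1
--             del B[0]
--         else:
--             continue
--
--     return res
-- ===== SOURCE B (Python) =====
-- def solution(A, B):
--     # Treat a descending-sorted copy of A as a stack whose top (the end) is the
--     # smallest unbeaten A element; walk B ascending and pop a match for every B
--     # element that beats the top.  (Return-value equivalence only: the original
--     # A sorts its arguments in place and deletes from B; this B works on copies.)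
--     a = sorted(A, reverse=True)
--     res = 0
--     for x in sorted(B):
--         if a and x > a[-1]:
--             a.pop()
--             res += 1
--     return res
-- ===== Notes on version B (the rewrite author's own statement) =====
-- stated objective: faster
-- what changed: Replaces A's descending for-loop over A with O(len(B)) front-deletions from B by an ascending fold over sorted(B) that treats a descending-sorted copy of A as a stack, popping its O(1) end on every win; Pre_ excludes exactly the inputs where A raises IndexError (B exhausted by deletions before the loop over A ends).
import Mathlib
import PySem

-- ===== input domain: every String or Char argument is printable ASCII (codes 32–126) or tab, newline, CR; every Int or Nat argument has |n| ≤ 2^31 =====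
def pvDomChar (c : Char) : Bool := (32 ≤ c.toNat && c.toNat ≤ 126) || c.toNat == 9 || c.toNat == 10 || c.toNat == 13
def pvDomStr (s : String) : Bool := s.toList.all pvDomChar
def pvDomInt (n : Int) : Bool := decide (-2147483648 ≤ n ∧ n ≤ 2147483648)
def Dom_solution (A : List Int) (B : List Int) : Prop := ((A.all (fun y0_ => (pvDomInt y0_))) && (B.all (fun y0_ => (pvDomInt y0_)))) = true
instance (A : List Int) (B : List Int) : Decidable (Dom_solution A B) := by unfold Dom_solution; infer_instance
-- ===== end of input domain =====

-- B replaces A's descending scan over A with front-deletions from B by an ascending fold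
-- over sorted(B) that pops the end of a descending-sorted copy of A on every win (no
-- front deletion, no mutation of the caller's lists). Return-value equivalence only:
-- the Python A sorts its arguments in place and deletes from B; B works on copies.

-- ===== PORT A =====
-- the for-loop of A: state is (remaining B, res); 'B[0]' is pyGet?, 'del B[0]' drops the head;
-- where Python raises IndexError (pyGet? = none) the port skips — those inputs are outside Pre_.
def solGo : List Int → List Int → Int → Int
  | [], _, res => res
  | x :: a, b, res =>
    match PySem.List.pyGet? b 0 with
    | some y => if x < y then solGo a (List.drop 1 b) (res + 1) else solGo a b res
    | none => solGo a b res

def solution (A : List Int) (B : List Int) : Int :=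
  solGo (PySem.List.sorted A (fun x => x) true) (PySem.List.sorted B (fun x => x) true) 0

-- ===== PORT B =====
-- Source B's loop body: 'if a and x > a[-1]' is the some-branch of getLast?; 'a.pop()' is dropLast
def altStep (s : List Int × Int) (x : Int) : List Int × Int :=
  match s.1.getLast? with
  | none => s
  | some z => if x > z then (s.1.dropLast, s.2 + 1) else s

def solution_alt (A : List Int) (B : List Int) : Int :=
  ((PySem.List.sorted B (fun x => x) false).foldl altStep
    (PySem.List.sorted A (fun x => x) true, 0)).2

-- ===== PRECONDITION & SPEC =====
-- Pre_ excludes exactly the inputs on which Python A raises IndexError: A raises iff B is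
-- shorter than A and B (sorted descending) can be fully matched into the len(A)-1 largest
-- elements of A — the Hall condition below: some tail B[j:] lacks enough strictly smaller
-- A-elements iff no such full matching exists, i.e. iff A returns.
def Pre_solution (A : List Int) (B : List Int) : Prop :=
  A.length ≤ B.length ∨
  ∃ j ∈ List.range B.length,
    (((PySem.List.sorted A (fun x => x) true).take (A.length - 1)).countP
      (fun x => decide (x < ((PySem.List.sorted B (fun x => x) true).getD j 0)))) + j < B.length
instance (A : List Int) (B : List Int) : Decidable (Pre_solution A B) := by
  unfold Pre_solution; infer_instance

def pvWitness_solution : List Int × List Int := ([3, 1, 5], [2, 4, 6])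

def Spec_solution (A : List Int) (B : List Int) (out : Int) : Prop := out = solution_alt A B
instance (A : List Int) (B : List Int) (out : Int) : Decidable (Spec_solution A B out) := by unfold Spec_solution; infer_instance

-- ===== CLAIM (what is proved, stated in full; the proofs are below) =====
def Claim_equal_solution : Prop := ∀ (A : List Int) (B : List Int), Dom_solution A B → Pre_solution A B → Spec_solution A B (solution A B)

-- ===== LEMMAS AND PROOFS =====

-- common reference form: consume a ascending from the front while walking b ascending
def altU : List Int → List Int → Int → Int
  | _, [], res => res
  | [], _ :: b, res => altU [] b res
  | z :: a, x :: b, res => if z < x then altU a b (res + 1) else altU (z :: a) b res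

lemma altU_nil_a (b : List Int) (res : Int) : altU [] b res = res := by
  induction b with
  | nil => rfl
  | cons x b ih => simpa [altU] using ih

lemma altU_succ (b a : List Int) (res : Int) : altU a b (res + 1) = altU a b res + 1 := by
  induction b generalizing a res with
  | nil => rfl
  | cons x b ih =>
    cases a with
    | nil => simpa [altU] using ih [] res
    | cons z a' =>
      by_cases h : z < x
      · simp [altU, h, ih]
      · simp [altU, h, ih]

-- B's fold, whose state list is a reversed (largest first, smallest at the end), computes altU
lemma foldl_altStep_eq_altU (b a : List Int) (res : Int) :
    (b.foldl altStep (a.reverse, res)).2 = altU a b res := by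
  induction b generalizing a res with
  | nil => simp [altU]
  | cons x b ih =>
    cases a with
    | nil => simpa [altStep, altU] using ih [] res
    | cons z a' =>
      have hlast : (z :: a').reverse.getLast? = some z := by
        simp [List.getLast?_reverse]
      have hdrop : (z :: a').reverse.dropLast = a'.reverse := by
        simp [List.reverse_cons]
      by_cases h : z < x
      · have e : List.foldl altStep ((z :: a').reverse, res) (x :: b)
            = List.foldl altStep (a'.reverse, res + 1) b := by
          simp only [List.foldl_cons, altStep, hlast, hdrop]
          rw [if_pos h]
        rw [e, ih, altU]
        rw [if_pos h]
      · have e : List.foldl altStep ((z :: a').reverse, res) (x :: b)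
            = List.foldl altStep ((z :: a').reverse, res) b := by
          simp only [List.foldl_cons, altStep, hlast]
          rw [if_neg h]
        rw [e, ih, altU]
        rw [if_neg h]

lemma altU_append_skip (x : Int) (b A : List Int) (res : Int)
    (hx : ∀ e ∈ b, e ≤ x) : altU (A ++ [x]) b res = altU A b res := by
  induction b generalizing A res with
  | nil => rfl
  | cons y b ih =>
    have hy : y ≤ x := hx y (by simp)
    have hx' : ∀ e ∈ b, e ≤ x := fun e he => hx e (by simp [he])
    cases A with
    | nil =>
      have : ¬ x < y := by omega
      simp only [List.nil_append, altU, this, if_neg, not_false_iff]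
      rw [show ([x] : List Int) = [] ++ [x] by simp] at *
      simpa using (ih [] res hx')
    | cons z A' =>
      by_cases h : z < y
      · simp [altU, h, ih _ _ hx']
      · simp [altU, h]
        exact ih (z :: A') res hx'

lemma altU_append_match (x y : Int) (B A : List Int) (res : Int)
    (hA : ∀ e ∈ A, e ≤ x) (hB : ∀ e ∈ B, e ≤ y) (hxy : x < y) :
    altU (A ++ [x]) (B ++ [y]) res = altU A B res + 1 := by
  induction B generalizing A res with
  | nil =>
    cases A with
    | nil => simp [altU, hxy]
    | cons z A' =>
      have hz : z < y := lt_of_le_of_lt (hA z (by simp)) hxy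
      have e1 : altU ((z :: A') ++ [x]) ([] ++ [y]) res = altU (A' ++ [x]) [] (res + 1) := by
        simp only [List.cons_append, List.nil_append, altU]; rw [if_pos hz]
      rw [e1]; simp [altU]
  | cons y' B' ih =>
    have hy' : y' ≤ y := hB y' (by simp)
    have hB' : ∀ e ∈ B', e ≤ y := fun e he => hB e (by simp [he])
    cases A with
    | nil =>
      by_cases h : x < y'
      · have e1 : altU (([] : List Int) ++ [x]) ((y' :: B') ++ [y]) res
            = altU [] (B' ++ [y]) (res + 1) := by
          simp only [List.nil_append, List.cons_append, altU]; rw [if_pos h]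
        rw [e1, altU_nil_a, altU_nil_a]
      · have e1 : altU (([] : List Int) ++ [x]) ((y' :: B') ++ [y]) res
            = altU [x] (B' ++ [y]) res := by
          simp only [List.nil_append, List.cons_append, altU]; rw [if_neg h]
        have h2 := ih ([] : List Int) res (by simp) hB'
        simp only [List.nil_append] at h2
        rw [e1, h2, altU_nil_a, altU_nil_a]
    | cons z A' =>
      by_cases h : z < y'
      · have hA' : ∀ e ∈ A', e ≤ x := fun e he => hA e (by simp [he])
        have e1 : altU ((z :: A') ++ [x]) ((y' :: B') ++ [y]) res
            = altU (A' ++ [x]) (B' ++ [y]) (res + 1) := by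
          simp only [List.cons_append, altU]; rw [if_pos h]
        have e2 : altU (z :: A') (y' :: B') res = altU A' B' (res + 1) := by
          simp only [altU]; rw [if_pos h]
        rw [e1, e2, ih A' (res + 1) hA' hB', altU_succ]
      · have e1 : altU ((z :: A') ++ [x]) ((y' :: B') ++ [y]) res
            = altU ((z :: A') ++ [x]) (B' ++ [y]) res := by
          simp only [List.cons_append, altU]; rw [if_neg h]
        have e2 : altU (z :: A') (y' :: B') res = altU (z :: A') B' res := by
          simp only [altU]; rw [if_neg h]
        rw [e1, e2, ih (z :: A') res hA hB']

lemma solGo_nil (a : List Int) (res : Int) : solGo a [] res = res := by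
  induction a with
  | nil => rfl
  | cons x a ih => simpa [solGo, PySem.List.pyGet?] using ih

lemma solGo_eq_altU (a : List Int) (b : List Int) (res : Int)
    (ha : a.Pairwise (fun p q => q ≤ p)) (hb : b.Pairwise (fun p q => q ≤ p)) :
    solGo a b res = altU a.reverse b.reverse res := by
  induction a generalizing b res with
  | nil => simp [solGo, altU_nil_a]
  | cons x a' ih =>
    have hxa : ∀ e ∈ a', e ≤ x := (List.pairwise_cons.mp ha).1
    have ha' : a'.Pairwise (fun p q => q ≤ p) := (List.pairwise_cons.mp ha).2
    cases b with
    | nil =>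
      rw [show solGo (x :: a') [] res = solGo a' [] res from by
        simp [solGo, PySem.List.pyGet?]]
      rw [solGo_nil]
      simp [altU]
    | cons y b' =>
      have hyb : ∀ e ∈ b', e ≤ y := (List.pairwise_cons.mp hb).1
      have hb' : b'.Pairwise (fun p q => q ≤ p) := (List.pairwise_cons.mp hb).2
      have hget : PySem.List.pyGet? (y :: b') 0 = some y :=
        PySem.List.pyGet?_zero_cons y b'
      by_cases h : x < y
      · rw [show solGo (x :: a') (y :: b') res = solGo a' b' (res + 1) from by
          simp only [solGo, hget]; rw [if_pos h]; rfl]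
        rw [ih b' (res + 1) ha' hb']
        rw [List.reverse_cons, List.reverse_cons]
        rw [altU_append_match x y b'.reverse a'.reverse res
          (by simpa using hxa) (by simpa using hyb) h]
        rw [altU_succ]
      · rw [show solGo (x :: a') (y :: b') res = solGo a' (y :: b') res from by
          simp only [solGo, hget]; rw [if_neg h]]
        rw [ih (y :: b') res ha' hb]
        rw [List.reverse_cons, List.reverse_cons]
        refine (altU_append_skip x (b'.reverse ++ [y]) a'.reverse res ?_).symm
        intro e he
        rcases List.mem_append.mp he with h' | h'
        · rw [List.mem_reverse] at h'; have := hyb e h'; omega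
        · simp at h'; omega

lemma sortedDesc_reverse (L : List Int) :
    (PySem.List.sorted L (fun x => x) true).reverse = PySem.List.sorted L (fun x => x) false := by
  symm
  apply PySem.List.sorted_id_eq_of_perm_of_pairwise
  · exact (List.reverse_perm _).trans (PySem.List.sorted_perm L (fun x => x) true)
  · rw [List.pairwise_reverse]
    exact PySem.List.sorted_pairwise_rev L (fun x => x)

-- ===== VERDICT (by name: the statement is the Claim_ definition above) =====
theorem solution_spec : Claim_equal_solution := by
  intro A B _ _
  unfold Spec_solution solution solution_alt
  rw [solGo_eq_altU _ _ _ (PySem.List.sorted_pairwise_rev A (fun x => x))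
    (PySem.List.sorted_pairwise_rev B (fun x => x))]
  rw [sortedDesc_reverse, sortedDesc_reverse]
  rw [show PySem.List.sorted A (fun x => x) true
      = (PySem.List.sorted A (fun x => x) false).reverse from (sortedDesc_reverse A) ▸ by simp]
  rw [foldl_altStep_eq_altU]
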